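-- pv_equiv track=rewrite | github.com/zadorian/SEARCH_ENGINEER | BACKEND/modules/sastre/disambiguation/passive.py | _are_related_places
-- ===== SOURCE A (Python) =====
-- def _are_related_places(place_a: str, place_b: str) -> bool:
--     """Check if two place names might refer to same location."""
--     # Simple equivalence check
--     equivalents = [
--         {'uk', 'united kingdom', 'britain', 'great britain', 'england'},
--         {'us', 'usa', 'united states', 'america'},
--         {'uae', 'united arab emirates', 'dubai'},
--     ]
--
--     for equiv_set in equivalents:
--         if place_a in equiv_set and place_b in equiv_set:
--             return True
--
--     return False
-- ===== SOURCE B (Python) =====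
-- # Idiomatic re-implementation: a flat name->group-id dict built once at import time;
-- # the check is two lookups and an equality instead of a scan over equivalence sets.
-- _PLACE_GROUP = {}
-- for _i, _names in enumerate([
--     ('uk', 'united kingdom', 'britain', 'great britain', 'england'),
--     ('us', 'usa', 'united states', 'america'),
--     ('uae', 'united arab emirates', 'dubai'),
-- ]):
--     for _name in _names:
--         _PLACE_GROUP[_name] = _i
--
--
-- def _are_related_places(place_a: str, place_b: str) -> bool:
--     """Check if two place names might refer to same location."""
--     group = _PLACE_GROUP.get(place_a)
--     return group is not None and group == _PLACE_GROUP.get(place_b)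
-- ===== Notes on version B (the rewrite author's own statement) =====
-- stated objective: idiomatic
-- what changed: Replaces the per-call scan over a list of equivalence sets with a flat name-to-group-id dict built once at import; the check becomes two lookups and an equality comparison.
import Mathlib
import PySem

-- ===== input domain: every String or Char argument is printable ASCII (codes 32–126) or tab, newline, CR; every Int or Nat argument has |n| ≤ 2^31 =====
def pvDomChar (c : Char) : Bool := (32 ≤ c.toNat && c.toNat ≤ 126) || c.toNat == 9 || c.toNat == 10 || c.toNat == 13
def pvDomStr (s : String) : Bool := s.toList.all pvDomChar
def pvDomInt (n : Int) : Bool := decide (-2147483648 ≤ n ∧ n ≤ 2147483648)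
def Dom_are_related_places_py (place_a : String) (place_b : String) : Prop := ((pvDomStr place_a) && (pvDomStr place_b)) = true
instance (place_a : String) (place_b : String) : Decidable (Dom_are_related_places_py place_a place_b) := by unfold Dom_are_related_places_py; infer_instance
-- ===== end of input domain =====

-- B replaces A's per-call scan over a list of equivalence sets with a flat name→group-id
-- dict built once; the check becomes two lookups and an equality (idiomatic, not claimed faster).


-- ===== PORT A =====
def pvEquivalents : List (PySem.Set String) :=
  [PySem.Set.ofList ["uk", "united kingdom", "britain", "great britain", "england"],
   PySem.Set.ofList ["us", "usa", "united states", "america"],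
   PySem.Set.ofList ["uae", "united arab emirates", "dubai"]]

def pvLoopA : List (PySem.Set String) → String → String → Bool
  | [], _, _ => false
  | s :: rest, a, b =>
      if PySem.Set.contains s a && PySem.Set.contains s b then true
      else pvLoopA rest a b

def are_related_places_py (place_a : String) (place_b : String) : Bool :=
  pvLoopA pvEquivalents place_a place_b

-- ===== PORT B =====
def pvPlaceGroup : PySem.Dict String Int :=
  (PySem.List.enumerate
    [["uk", "united kingdom", "britain", "great britain", "england"],
     ["us", "usa", "united states", "america"],
     ["uae", "united arab emirates", "dubai"]]).foldl
    (fun d p => p.2.foldl (fun d name => d.insert name p.1) d) PySem.Dict.empty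

def are_related_places_py_alt (place_a : String) (place_b : String) : Bool :=
  match pvPlaceGroup.get? place_a with
  | none => false
  | some g => pvPlaceGroup.get? place_b == some g

-- ===== PRECONDITION & SPEC =====
def Spec_are_related_places_py (place_a : String) (place_b : String) (out : Bool) : Prop := out = are_related_places_py_alt place_a place_b
instance (place_a : String) (place_b : String) (out : Bool) : Decidable (Spec_are_related_places_py place_a place_b out) := by unfold Spec_are_related_places_py; infer_instance

-- ===== CLAIM (what is proved, stated in full; the proofs are below) =====
def Claim_equal_are_related_places_py : Prop := ∀ (place_a : String) (place_b : String), Dom_are_related_places_py place_a place_b → Spec_are_related_places_py place_a place_b (are_related_places_py place_a place_b)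

-- ===== LEMMAS AND PROOFS =====

-- all 13 names appearing in either program's tables
def pvAllNames : List String :=
  ["uk", "united kingdom", "britain", "great britain", "england",
   "us", "usa", "united states", "america", "uae", "united arab emirates", "dubai"]

theorem pv_get?_none (x : String) (h : x ∉ pvAllNames) : pvPlaceGroup.get? x = none := by
  simp only [pvAllNames, List.mem_cons, List.not_mem_nil, or_false, not_or] at h
  obtain ⟨h1, h2, h3, h4, h5, h6, h7, h8, h9, h10, h11, h12⟩ := h
  simp [pvPlaceGroup, PySem.List.enumerate, PySem.Dict.get?_insert,
    PySem.Dict.get?_empty, h1, h2, h3, h4, h5, h6, h7, h8, h9, h10, h11, h12]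

theorem pv_loopA_none_right (a x : String) (h : x ∉ pvAllNames) :
    pvLoopA pvEquivalents a x = false := by
  simp only [pvAllNames, List.mem_cons, List.not_mem_nil, or_false, not_or] at h
  obtain ⟨h1, h2, h3, h4, h5, h6, h7, h8, h9, h10, h11, h12⟩ := h
  simp [pvLoopA, pvEquivalents, PySem.Set.contains, PySem.Set.ofList, PySem.Set.add,
    h1, h2, h3, h4, h5, h6, h7, h8, h9, h10, h11, h12]

theorem pv_loopA_none_left (x b : String) (h : x ∉ pvAllNames) :
    pvLoopA pvEquivalents x b = false := by
  simp only [pvAllNames, List.mem_cons, List.not_mem_nil, or_false, not_or] at h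
  obtain ⟨h1, h2, h3, h4, h5, h6, h7, h8, h9, h10, h11, h12⟩ := h
  simp [pvLoopA, pvEquivalents, PySem.Set.contains, PySem.Set.ofList, PySem.Set.add,
    h1, h2, h3, h4, h5, h6, h7, h8, h9, h10, h11, h12]

-- ===== VERDICT (by name: the statement is the Claim_ definition above) =====
theorem are_related_places_py_spec : Claim_equal_are_related_places_py := by
  intro a b _
  unfold Spec_are_related_places_py are_related_places_py
  by_cases ha : a ∈ pvAllNames
  · by_cases hb : b ∈ pvAllNames
    · simp only [pvAllNames, List.mem_cons, List.not_mem_nil, or_false] at ha hb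
      rcases ha with rfl | rfl | rfl | rfl | rfl | rfl | rfl | rfl | rfl | rfl | rfl | rfl <;>
        (rcases hb with rfl | rfl | rfl | rfl | rfl | rfl | rfl | rfl | rfl | rfl | rfl | rfl <;> decide)
    · rw [pv_loopA_none_right a b hb]
      unfold are_related_places_py_alt
      rw [pv_get?_none b hb]
      cases pvPlaceGroup.get? a <;> simp
  · rw [pv_loopA_none_left a b ha]
    unfold are_related_places_py_alt
    rw [pv_get?_none a ha]
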